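-- pv_equiv track=rewrite | github.com/xypeng9903/AReaL | tests/torchrun/run_capture_and_replay.py | _select_param_names
-- ===== SOURCE A (Python) =====
-- PREFERRED_PARAM_SUFFIXES = [
--     "embed_tokens.weight",
--     "layers.0.self_attn.q_proj.weight",
--     "layers.0.self_attn.k_proj.weight",
--     "layers.0.self_attn.v_proj.weight",
--     "layers.0.self_attn.o_proj.weight",
--     "layers.0.mlp.gate_proj.weight",
--     "layers.0.mlp.up_proj.weight",
--     "layers.0.mlp.down_proj.weight",
--     "norm.weight",
--     "lm_head.weight",
-- ]
--
-- def _select_param_names(all_names: list[str]) -> list[str]: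
--     selected: list[str] = []
--     for suffix in PREFERRED_PARAM_SUFFIXES:
--         for name in all_names:
--             if name.endswith(suffix) and name not in selected:
--                 selected.append(name)
--                 break
--     return selected if selected else sorted(all_names)[:10]
-- ===== SOURCE B (Python) =====
-- PREFERRED_PARAM_SUFFIXES = [
--     "embed_tokens.weight",
--     "layers.0.self_attn.q_proj.weight",
--     "layers.0.self_attn.k_proj.weight",
--     "layers.0.self_attn.v_proj.weight",
--     "layers.0.self_attn.o_proj.weight",
--     "layers.0.mlp.gate_proj.weight",
--     "layers.0.mlp.up_proj.weight",
--     "layers.0.mlp.down_proj.weight",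
--     "norm.weight",
--     "lm_head.weight",
-- ]
--
-- def _select_param_names(all_names: list[str]) -> list[str]:
--     # One pass over all_names: tag each name with the index of the first suffix it
--     # ends with, keep only the first name per index, then sort the tags by index.
--     seen: set[int] = set()
--     tagged: list[tuple[int, str]] = []
--     for name in all_names:
--         for i, suffix in enumerate(PREFERRED_PARAM_SUFFIXES):
--             if name.endswith(suffix):
--                 if i not in seen:
--                     seen.add(i)
--                     tagged.append((i, name))
--                 break
--     tagged.sort(key=lambda p: p[0])
--     selected = [name for _, name in tagged]
--     return selected if selected else sorted(all_names)[:10]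
-- ===== Notes on version B (the rewrite author's own statement) =====
-- stated objective: alternative
-- what changed: B makes a single pass over all_names tagging each name with the index of the first suffix it ends with (keeping only the first name per index via a seen-set), then sorts the (index, name) tags by index, instead of A's rescanning all_names once per suffix; same empty fallback sorted(all_names)[:10].
import Mathlib
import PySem

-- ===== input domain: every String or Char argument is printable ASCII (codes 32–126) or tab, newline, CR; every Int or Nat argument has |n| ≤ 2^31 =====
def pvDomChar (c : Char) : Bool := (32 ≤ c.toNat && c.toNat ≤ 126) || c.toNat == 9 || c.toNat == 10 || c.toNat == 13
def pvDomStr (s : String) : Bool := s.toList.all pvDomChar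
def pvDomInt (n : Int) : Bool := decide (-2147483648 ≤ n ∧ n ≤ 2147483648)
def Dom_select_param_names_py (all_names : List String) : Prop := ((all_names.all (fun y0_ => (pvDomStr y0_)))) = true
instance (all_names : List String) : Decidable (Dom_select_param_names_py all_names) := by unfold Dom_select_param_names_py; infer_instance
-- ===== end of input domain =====

-- B replaces A's per-suffix rescans of all_names by one pass over all_names that tags each
-- name with the index of the first suffix it ends with (first name per index only), then
-- sorts the tags by index (alternative decomposition, same cost).

-- module constant PREFERRED_PARAM_SUFFIXES (shared by both Python versions)
def pvSuffixes : List String := [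
  "embed_tokens.weight",
  "layers.0.self_attn.q_proj.weight",
  "layers.0.self_attn.k_proj.weight",
  "layers.0.self_attn.v_proj.weight",
  "layers.0.self_attn.o_proj.weight",
  "layers.0.mlp.gate_proj.weight",
  "layers.0.mlp.up_proj.weight",
  "layers.0.mlp.down_proj.weight",
  "norm.weight",
  "lm_head.weight"]

-- ===== PORT A =====
-- outer loop over suffixes; inner 'for name … break' is find? of the loop's condition
def select_param_names_py (all_names : List String) : List String :=
  let selected := pvSuffixes.foldl (fun selected suffix =>
      match all_names.find? (fun name => PySem.Str.endswith name suffix && !(selected.contains name)) with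
      | some name => selected ++ [name]
      | none => selected) []
  if selected = [] then PySem.List.slice (PySem.List.sorted all_names (fun x => x) false) none (some 10)
  else selected

-- ===== PORT B =====
-- one pass over all_names; the inner 'for i, suffix in enumerate(…): if endswith: …; break'
-- is find? over the enumerated suffix list; then sort the collected (index, name) tags by index
def select_param_names_py_alt (all_names : List String) : List String :=
  let st := all_names.foldl (fun (st : PySem.Set Int × List (Int × String)) name =>
      match (PySem.List.enumerate pvSuffixes).find? (fun p => PySem.Str.endswith name p.2) with
      | some p => if PySem.Set.contains st.1 p.1 then st
                  else (PySem.Set.add st.1 p.1, st.2 ++ [(p.1, name)])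
      | none => st) (PySem.Set.empty, [])
  let selected := (PySem.List.sorted st.2 (fun p => p.1) false).map (fun p => p.2)
  if selected = [] then PySem.List.slice (PySem.List.sorted all_names (fun x => x) false) none (some 10)
  else selected

-- ===== PRECONDITION & SPEC =====
def Spec_select_param_names_py (all_names : List String) (out : List String) : Prop := out = select_param_names_py_alt all_names
instance (all_names : List String) (out : List String) : Decidable (Spec_select_param_names_py all_names out) := by unfold Spec_select_param_names_py; infer_instance

-- ===== CLAIM (what is proved, stated in full; the proofs are below) =====
def Claim_equal_select_param_names_py : Prop := ∀ (all_names : List String), Dom_select_param_names_py all_names → Spec_select_param_names_py all_names (select_param_names_py all_names)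

-- ===== LEMMAS AND PROOFS =====

-- abbreviation for the proofs: does name end with suffix?
def pvEw (n s : String) : Bool := PySem.Str.endswith n s

theorem pvEw_iff (n s : String) : pvEw n s = true ↔ s.toList <:+ n.toList := by
  simp [pvEw, PySem.Chars.endswith_iff]

-- the listed suffixes are pairwise non-suffixes of one another
theorem pv_pairwise : ∀ s ∈ pvSuffixes, ∀ t ∈ pvSuffixes, s = t ∨ pvEw t s = false := by decide

theorem pv_nodup : pvSuffixes.Nodup := by decide

-- a string ends with at most one of the listed suffixes
theorem pv_uniq {n s t : String} (hs : s ∈ pvSuffixes) (ht : t ∈ pvSuffixes)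
    (hes : pvEw n s = true) (het : pvEw n t = true) : s = t := by
  rcases List.suffix_or_suffix_of_suffix ((pvEw_iff n s).mp hes) ((pvEw_iff n t).mp het) with h | h
  · rcases pv_pairwise s hs t ht with he | he
    · exact he
    · exact absurd ((pvEw_iff t s).mpr h) (by simp [he])
  · rcases pv_pairwise t ht s hs with he | he
    · exact he.symm
    · exact absurd ((pvEw_iff s t).mpr h) (by simp [he])

-- A-side loop characterisation: with the invariant that no accumulated name ends with a
-- remaining suffix, the 'name not in selected' test is vacuous and each step is a plain find?
theorem pvA_loop (all_names : List String) :
    ∀ (sufs : List String) (acc : List String),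
      sufs ⊆ pvSuffixes → sufs.Nodup →
      (∀ x ∈ acc, ∀ s ∈ sufs, pvEw x s = false) →
      sufs.foldl (fun selected suffix =>
        match all_names.find? (fun name => PySem.Str.endswith name suffix && !(selected.contains name)) with
        | some name => selected ++ [name]
        | none => selected) acc
      = acc ++ sufs.filterMap (fun s => all_names.find? (fun n => pvEw n s)) := by
  intro sufs
  induction sufs with
  | nil => intro acc _ _ _; simp
  | cons s rest ih =>
    intro acc hsub hnd hinv
    have hsmem : s ∈ pvSuffixes := hsub (List.mem_cons_self ..)
    have hstep : (fun name => PySem.Str.endswith name s && !(acc.contains name))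
        = (fun n => pvEw n s) := by
      funext n
      by_cases hc : acc.contains n = true
      · have hn : n ∈ acc := by simpa using hc
        have := hinv n hn s (List.mem_cons_self ..)
        simp [pvEw] at this ⊢
        simp [this]
      · simp [pvEw]
        intro _; simpa using hc
    simp only [List.foldl_cons, List.filterMap_cons, hstep]
    have hrsub : rest ⊆ pvSuffixes := fun x hx => hsub (List.mem_cons_of_mem _ hx)
    have hrnd : rest.Nodup := (List.nodup_cons.mp hnd).2
    have hsnotin : s ∉ rest := (List.nodup_cons.mp hnd).1
    cases hfind : all_names.find? (fun n => pvEw n s) with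
    | none =>
      rw [ih acc hrsub hrnd ?_]
      intro x hx t ht
      exact hinv x hx t (List.mem_cons_of_mem _ ht)
    | some m =>
      have hm : pvEw m s = true := by
        have := List.find?_some hfind; simpa using this
      rw [ih (acc ++ [m]) hrsub hrnd ?_]
      · simp
      · intro x hx t ht
        rcases List.mem_append.mp hx with hx | hx
        · exact hinv x hx t (List.mem_cons_of_mem _ ht)
        · have hxm : x = m := by simpa using hx
          subst hxm
          by_cases he : pvEw x t = true
          · exact absurd (pv_uniq hsmem (hrsub ht) hm he) (fun h => hsnotin (h ▸ ht))
          · simpa using he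

-- B-side abbreviations for the proofs: the inner find? over the enumerated suffixes, and one loop step
def pvFind (n : String) : Option (Int × String) :=
  (PySem.List.enumerate pvSuffixes).find? (fun p => PySem.Str.endswith n p.2)

def pvStep (st : PySem.Set Int × List (Int × String)) (name : String) :
    PySem.Set Int × List (Int × String) :=
  match pvFind name with
  | some p => if PySem.Set.contains st.1 p.1 then st
              else (PySem.Set.add st.1 p.1, st.2 ++ [(p.1, name)])
  | none => st

-- does name route to suffix index i?
def pvHit (i : Int) (m : String) : Bool := (pvFind m).any (fun p => p.1 == i)

-- the suffix-order list of (index, first matching name) pairs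
def pvM (ns : List String) : List (Int × String) :=
  (PySem.List.enumerate pvSuffixes).filterMap
    (fun p => (ns.find? (fun n => pvEw n p.2)).map (fun n => (p.1, n)))

theorem pv_enum_snd_mem {p : Int × String} (hp : p ∈ PySem.List.enumerate pvSuffixes) :
    p.2 ∈ pvSuffixes := by
  rcases (PySem.List.mem_enumerate_iff ..).mp hp with ⟨k, hk, rfl⟩
  exact List.getElem_mem hk

theorem pv_enum_fst_inj {p q : Int × String}
    (hp : p ∈ PySem.List.enumerate pvSuffixes) (hq : q ∈ PySem.List.enumerate pvSuffixes)
    (h : p.1 = q.1) : p = q := by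
  rcases (PySem.List.mem_enumerate_iff ..).mp hp with ⟨k, hk, rfl⟩
  rcases (PySem.List.mem_enumerate_iff ..).mp hq with ⟨k', hk', rfl⟩
  simp only at h
  have : k = k' := by omega
  subst this; rfl

theorem pvFind_some {n : String} {q : Int × String} (hf : pvFind n = some q) :
    pvEw n q.2 = true ∧ q ∈ PySem.List.enumerate pvSuffixes := by
  constructor
  · have := List.find?_some hf; simpa [pvEw] using this
  · exact List.mem_of_find?_eq_some hf

-- n ends with the suffix at index i  ⇒  the inner loop stops exactly there
theorem pvFind_eq {i : Int} {s n : String}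
    (hmem : (i, s) ∈ PySem.List.enumerate pvSuffixes) (h : pvEw n s = true) :
    pvFind n = some (i, s) := by
  cases hf : pvFind n with
  | none =>
    have := List.find?_eq_none.mp hf (i, s) hmem
    simp [pvEw] at h; simp [h] at this
  | some q =>
    obtain ⟨hq2, hqm⟩ := pvFind_some hf
    have hss : q.2 = s := pv_uniq (pv_enum_snd_mem hqm) (pv_enum_snd_mem hmem) hq2 h
    -- same suffix string at two enumerate positions: the positions coincide (pvSuffixes has no duplicates)
    rcases (PySem.List.mem_enumerate_iff ..).mp hqm with ⟨k, hk, hqe⟩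
    rcases (PySem.List.mem_enumerate_iff ..).mp hmem with ⟨k', hk', he⟩
    have hgk : pvSuffixes[k] = pvSuffixes[k'] := by
      have h1 : q.2 = pvSuffixes[k] := by rw [hqe]
      have h2 : s = pvSuffixes[k'] := by
        have := congrArg Prod.snd he; simpa using this
      rw [← h1, ← h2, hss]
    have hkk : k = k' := by
      by_contra hne
      exact (List.Nodup.getElem_inj_iff pv_nodup).mp hgk |> hne
    subst hkk
    rw [hqe, ← he]

-- characterisation of pvHit on the suffix at index i
theorem pvHit_eq {i : Int} {s : String} (hmem : (i, s) ∈ PySem.List.enumerate pvSuffixes) :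
    ∀ m, pvHit i m = pvEw m s := by
  intro m
  by_cases h : pvEw m s = true
  · rw [h, pvHit, pvFind_eq hmem h]; simp
  · simp only [Bool.not_eq_true] at h
    rw [h, pvHit]
    cases hf : pvFind m with
    | none => simp
    | some q =>
      simp only [Option.any_some]
      by_contra hb
      simp only [Bool.not_eq_false, beq_iff_eq] at hb
      obtain ⟨hq2, hqm⟩ := pvFind_some hf
      have : q = (i, s) := pv_enum_fst_inj hqm hmem (by simpa using hb)
      rw [this] at hq2
      simp [h] at hq2

theorem pv_contains_iff (s : PySem.Set Int) (i : Int) :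
    PySem.Set.contains s i = true ↔ i ∈ s := by
  simp [PySem.Set.contains]

-- membership in the tag list built by B's loop
theorem pvB_mem : ∀ (ns : List String) (st : PySem.Set Int × List (Int × String)) (i : Int) (n : String),
    (i, n) ∈ (ns.foldl pvStep st).2 ↔
      (i, n) ∈ st.2 ∨ (PySem.Set.contains st.1 i = false ∧ ns.find? (pvHit i) = some n) := by
  intro ns
  induction ns with
  | nil => intro st i n; simp
  | cons m rest ih =>
    intro st i n
    simp only [List.foldl_cons]
    cases hf : pvFind m with
    | none =>
      have hstep : pvStep st m = st := by simp only [pvStep, hf]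
      have hhit : pvHit i m = false := by simp only [pvHit, hf]; rfl
      rw [hstep, ih, List.find?_cons_of_neg (by simp [hhit])]
    | some p =>
      by_cases hc : PySem.Set.contains st.1 p.1 = true
      · have hstep : pvStep st m = st := by simp only [pvStep, hf, hc, if_true]
        rw [hstep, ih]
        by_cases hip : i = p.1
        · subst hip
          constructor
          · rintro (h | ⟨h1, h2⟩)
            · exact Or.inl h
            · rw [h1] at hc; cases hc
          · rintro (h | ⟨h1, h2⟩)
            · exact Or.inl h
            · rw [h1] at hc; cases hc
        · have hhit : pvHit i m = false := by
            simp only [pvHit, hf, Option.any_some]; simp; intro h; exact absurd h.symm hip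
          rw [List.find?_cons_of_neg (by simp [hhit])]
      · have hc' : PySem.Set.contains st.1 p.1 = false := by simpa using hc
        have hstep : pvStep st m = (PySem.Set.add st.1 p.1, st.2 ++ [(p.1, m)]) := by
          simp only [pvStep, hf, hc', Bool.false_eq_true, if_false]
        rw [hstep, ih]
        by_cases hip : i = p.1
        · subst hip
          have hhit : pvHit p.1 m = true := by simp [pvHit, hf]
          rw [List.find?_cons_of_pos hhit]
          have hca : PySem.Set.contains (PySem.Set.add st.1 p.1) p.1 = true := by
            simp [PySem.Set.mem_add]
          constructor
          · rintro (h | ⟨h1, _⟩)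
            · rcases List.mem_append.mp h with h | h
              · exact Or.inl h
              · have hnm : n = m := by simpa using h
                exact Or.inr ⟨hc', by rw [hnm]⟩
            · rw [hca] at h1; cases h1
          · rintro (h | ⟨_, h2⟩)
            · exact Or.inl (List.mem_append.mpr (Or.inl h))
            · have hnm : n = m := by simpa using h2.symm
              exact Or.inl (List.mem_append.mpr (Or.inr (by simp [hnm])))
        · have hhit : pvHit i m = false := by
            simp only [pvHit, hf, Option.any_some]; simp; intro h; exact absurd h.symm hip
          rw [List.find?_cons_of_neg (by simp [hhit])]
          have hmem' : (i, n) ∈ st.2 ++ [(p.1, m)] ↔ (i, n) ∈ st.2 := by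
            simp; intro h; exact absurd h hip
          have hca : PySem.Set.contains (PySem.Set.add st.1 p.1) i
              = PySem.Set.contains st.1 i := by
            by_cases hm : i ∈ st.1
            · simp [PySem.Set.mem_add, hm]
            · simp [PySem.Set.mem_add, hm, hip]
          rw [hmem', hca]

-- the recorded indices stay distinct
theorem pvB_keys : ∀ (ns : List String) (st : PySem.Set Int × List (Int × String)),
    (∀ i n, (i, n) ∈ st.2 → PySem.Set.contains st.1 i = true) →
    ((st.2.map Prod.fst).Nodup) →
    (((ns.foldl pvStep st).2.map Prod.fst).Nodup) := by
  intro ns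
  induction ns with
  | nil => intro st _ hnd; simpa using hnd
  | cons m rest ih =>
    intro st hseen hnd
    simp only [List.foldl_cons]
    cases hf : pvFind m with
    | none =>
      have hstep : pvStep st m = st := by simp only [pvStep, hf]
      rw [hstep]; exact ih st hseen hnd
    | some p =>
      by_cases hc : PySem.Set.contains st.1 p.1 = true
      · have hstep : pvStep st m = st := by simp only [pvStep, hf, hc, if_true]
        rw [hstep]; exact ih st hseen hnd
      · have hc' : PySem.Set.contains st.1 p.1 = false := by simpa using hc
        have hstep : pvStep st m = (PySem.Set.add st.1 p.1, st.2 ++ [(p.1, m)]) := by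
          simp only [pvStep, hf, hc', Bool.false_eq_true, if_false]
        rw [hstep]
        apply ih
        · intro i n hmem
          rcases List.mem_append.mp hmem with h | h
          · have := hseen i n h
            simp only [pv_contains_iff] at this ⊢
            exact (PySem.Set.mem_add ..).mpr (Or.inl this)
          · simp at h
            simp only [pv_contains_iff]
            exact (PySem.Set.mem_add ..).mpr (Or.inr h.1)
        · have hnp : p.1 ∉ st.2.map Prod.fst := by
            intro hmm
            rcases List.mem_map.mp hmm with ⟨⟨i0, n0⟩, hmem0, hfst⟩
            have hfst' : i0 = p.1 := hfst
            subst hfst'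
            have := hseen _ _ hmem0
            rw [this] at hc'; cases hc'
          simp only [List.map_append, List.map_cons, List.map_nil]
          simp [List.nodup_append, hnd]
          intro a x hax heq
          exact hnp (List.mem_map.mpr ⟨(a, x), hax, heq⟩)

-- pvM is strictly increasing in the index
theorem pvM_pairwise (ns : List String) : (pvM ns).Pairwise (fun a b => a.1 < b.1) := by
  rw [pvM, List.pairwise_filterMap]
  refine (PySem.List.pairwise_lt_enumerate pvSuffixes 0).imp ?_
  intro a b h x hx y hy
  rcases Option.map_eq_some_iff.mp hx with ⟨_, _, rfl⟩
  rcases Option.map_eq_some_iff.mp hy with ⟨_, _, rfl⟩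
  simpa using h

theorem pvM_mem (ns : List String) (i : Int) (n : String) :
    (i, n) ∈ pvM ns ↔ ∃ s, (i, s) ∈ PySem.List.enumerate pvSuffixes ∧
      ns.find? (fun n' => pvEw n' s) = some n := by
  rw [pvM, List.mem_filterMap]
  constructor
  · rintro ⟨p, hp, hmap⟩
    rcases Option.map_eq_some_iff.mp hmap with ⟨n0, hn0, heq⟩
    have h1 : p.1 = i := by simpa using congrArg Prod.fst heq
    have h2 : n0 = n := by simpa using congrArg Prod.snd heq
    exact ⟨p.2, by rw [← h1]; exact hp, by rw [← h2]; exact hn0⟩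
  · rintro ⟨s, hmem, hfind⟩
    exact ⟨(i, s), hmem, by rw [hfind]; rfl⟩

-- reading the names off the suffix-ordered tag list is A's per-suffix filterMap
theorem pv_map_snd (g : String → Option String) :
    ∀ (l : List String) (s0 : Int),
      ((PySem.List.enumerate l s0).filterMap
        (fun p => (g p.2).map (fun n => (p.1, n)))).map (fun p => p.2)
      = l.filterMap g := by
  intro l
  induction l with
  | nil => intro s0; simp [PySem.List.enumerate]
  | cons x xs ih =>
    intro s0
    rw [PySem.List.enumerate_cons, List.filterMap_cons, List.filterMap_cons]
    cases hg : g x with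
    | none => simpa using ih (s0 + 1)
    | some v => simp only [Option.map_some, List.map_cons]; rw [ih (s0 + 1)]

-- B's tag list holds exactly pvM's pairs
theorem pvB_tags (all_names : List String) (i : Int) (n : String) :
    (i, n) ∈ (all_names.foldl pvStep (PySem.Set.empty, [])).2 ↔ (i, n) ∈ pvM all_names := by
  rw [pvB_mem, pvM_mem]
  have hemp : PySem.Set.contains (PySem.Set.empty : PySem.Set Int) i = false := by
    simp [PySem.Set.empty]
  simp only [List.not_mem_nil, false_or, hemp, true_and]
  constructor
  · intro hfind
    have hhit : pvHit i n = true := by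
      have := List.find?_some hfind; simpa using this
    simp only [pvHit] at hhit
    cases hf : pvFind n with
    | none => rw [hf] at hhit; cases hhit
    | some q =>
      rw [hf] at hhit
      obtain ⟨_, hqm⟩ := pvFind_some hf
      have hq1 : q.1 = i := by simpa using hhit
      have hqmem : (i, q.2) ∈ PySem.List.enumerate pvSuffixes := by rw [← hq1]; exact hqm
      refine ⟨q.2, hqmem, ?_⟩
      have hp : pvHit i = (fun n' => pvEw n' q.2) := funext (pvHit_eq hqmem)
      rw [← hp]; exact hfind
  · rintro ⟨s, hmem, hfind⟩
    have hp : pvHit i = (fun n' => pvEw n' s) := funext (pvHit_eq hmem)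
    rw [hp]; exact hfind

-- the two 'selected' lists coincide, hence the two programs
theorem pv_sel_eq (all_names : List String) :
    select_param_names_py all_names = select_param_names_py_alt all_names := by
  unfold select_param_names_py select_param_names_py_alt
  have hA := pvA_loop all_names pvSuffixes [] (fun x hx => hx) pv_nodup (by intro x hx; simp at hx)
  have hfun : (fun (st : PySem.Set Int × List (Int × String)) name =>
      match (PySem.List.enumerate pvSuffixes).find? (fun p => PySem.Str.endswith name p.2) with
      | some p => if PySem.Set.contains st.1 p.1 then st
                  else (PySem.Set.add st.1 p.1, st.2 ++ [(p.1, name)])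
      | none => st) = pvStep := by
    funext st name; rw [pvStep, pvFind]
  have hTgNd : ((all_names.foldl pvStep (PySem.Set.empty, [])).2).Nodup := by
    have hk := pvB_keys all_names (PySem.Set.empty, []) (by intro i n h; simp at h) (by simp)
    exact hk.of_map Prod.fst
  have hMNd : (pvM all_names).Nodup := by
    refine (pvM_pairwise all_names).imp ?_
    intro a b h heq; rw [heq] at h; exact lt_irrefl _ h
  have hperm : (pvM all_names).Perm (all_names.foldl pvStep (PySem.Set.empty, [])).2 := by
    rw [List.perm_ext_iff_of_nodup hMNd hTgNd]
    rintro ⟨i, n⟩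
    exact (pvB_tags all_names i n).symm
  have hsorted : PySem.List.sorted (all_names.foldl pvStep (PySem.Set.empty, [])).2
      (fun p => p.1) false = pvM all_names :=
    PySem.List.sorted_eq_of_perm_of_pairwise_lt _ _ _ hperm (pvM_pairwise all_names)
  have hB : (PySem.List.sorted (all_names.foldl pvStep (PySem.Set.empty, [])).2
        (fun p => p.1) false).map (fun p => p.2)
      = pvSuffixes.filterMap (fun s => all_names.find? (fun n => pvEw n s)) := by
    rw [hsorted, pvM]
    exact pv_map_snd (fun s => List.find? (fun n => pvEw n s) all_names) pvSuffixes 0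
  simp only [hA, List.nil_append, hfun, hB]

-- ===== VERDICT (by name: the statement is the Claim_ definition above) =====
theorem select_param_names_py_spec : Claim_equal_select_param_names_py := by
  intro all_names _
  unfold Spec_select_param_names_py
  exact pv_sel_eq all_names
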